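-- pv_equiv track=rewrite | github.com/zsamotw/codility-python | lessons/lesson7/fish.py | solution
-- ===== SOURCE A (Python) =====
-- def solution(A, B):
--     fishes = [(size, direction) for (size, direction) in zip(A, B)]
--     fish_stack = []
--     for fish in fishes:
--         if not fish_stack:
--             fish_stack.append(fish)
--         else:
--             stack = fish_stack[:]
--             for f in fish_stack:
--                 if f[1] == 1 and fish[1] == 0 and f[0] < fish[0]:
--                     # loop(stack, fish)
--                     stack.remove(f)
--
--                 elif f[1] == 1 and fish[1] == 0 and f[0] > fish[0]:
--                     break
--                 else:
--                     stack = [fish] + stack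
--                     break
--             fish_stack = stack
--             if not fish_stack:
--                 fish_stack.append(fish)
--     return len(fish_stack)
-- ===== SOURCE B (Python) =====
-- def solution(A, B):
--     stack = []  # top of the fish stack is the last element
--     for size, direction in zip(A, B):
--         while stack and stack[-1][1] == 1 and direction == 0 and stack[-1][0] < size:
--             stack.pop()
--         if stack and stack[-1][1] == 1 and direction == 0 and stack[-1][0] > size:
--             continue  # the new upstream fish is eaten
--         stack.append((size, direction))
--     return len(stack)
-- ===== Notes on version B (the rewrite author's own statement) =====
-- stated objective: faster
-- what changed: Replaced A's per-fish copy of the stack with an inner scan and list.remove by a single-pass stack that pops smaller downstream fish off the top and pushes or drops the new fish once.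
import Mathlib
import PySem

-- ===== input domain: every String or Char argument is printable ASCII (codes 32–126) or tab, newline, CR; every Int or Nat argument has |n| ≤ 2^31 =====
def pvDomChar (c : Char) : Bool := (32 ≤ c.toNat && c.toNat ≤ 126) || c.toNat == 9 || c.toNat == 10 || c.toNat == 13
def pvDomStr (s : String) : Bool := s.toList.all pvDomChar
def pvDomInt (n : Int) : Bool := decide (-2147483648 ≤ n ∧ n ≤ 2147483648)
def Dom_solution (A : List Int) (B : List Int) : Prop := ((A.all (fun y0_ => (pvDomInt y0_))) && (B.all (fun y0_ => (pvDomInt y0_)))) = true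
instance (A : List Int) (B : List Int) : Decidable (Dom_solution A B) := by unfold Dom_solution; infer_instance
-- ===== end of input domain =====

-- B replaces A's quadratic per-fish copy/remove scan with a single-pass stack (pop smaller
-- downstream fish off the top); equal return value everywhere, asymptotically faster.

-- ===== PORT A =====
-- stack.remove(f): remove the first occurrence of f (f is always present when A calls it,
-- so Python never raises here and this total helper is exact)
def pvRemoveA (x : Int × Int) : List (Int × Int) → List (Int × Int)
  | [] => []
  | y :: rest => if y = x then rest else y :: pvRemoveA x rest

-- the inner `for f in fish_stack:` loop of A: first arg is the list iterated over,
-- second is the mutable `stack` copy; `break` returns the current stack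
def pvInnerA (fish : Int × Int) : List (Int × Int) → List (Int × Int) → List (Int × Int)
  | [], stack => stack
  | f :: rest, stack =>
    if f.2 = 1 ∧ fish.2 = 0 ∧ f.1 < fish.1 then pvInnerA fish rest (pvRemoveA f stack)
    else if f.2 = 1 ∧ fish.2 = 0 ∧ f.1 > fish.1 then stack
    else fish :: stack

-- one iteration of A's outer `for fish in fishes:` loop
def pvStepA (fs : List (Int × Int)) (fish : Int × Int) : List (Int × Int) :=
  if fs = [] then [fish]
  else
    let stack := pvInnerA fish fs fs
    if stack = [] then [fish] else stack

def solution (A : List Int) (B : List Int) : Int :=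
  (((A.zip B).foldl pvStepA []).length : Int)

-- ===== PORT B =====
-- Source B keeps the stack top at the list's end; the port keeps the top at the list's
-- head (same stack, same operations: peek / pop / push at the top).
-- the `while stack and …: stack.pop()` loop of B
def pvPopB (fish : Int × Int) : List (Int × Int) → List (Int × Int)
  | [] => []
  | t :: rest => if t.2 = 1 ∧ fish.2 = 0 ∧ t.1 < fish.1 then pvPopB fish rest else t :: rest

-- one iteration of B's `for size, direction in zip(A, B):` loop
def pvStepB (st : List (Int × Int)) (fish : Int × Int) : List (Int × Int) :=
  match pvPopB fish st with
  | [] => [fish]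
  | t :: rest => if t.2 = 1 ∧ fish.2 = 0 ∧ t.1 > fish.1 then t :: rest else fish :: t :: rest

def solution_alt (A : List Int) (B : List Int) : Int :=
  (((A.zip B).foldl pvStepB []).length : Int)

-- ===== PRECONDITION & SPEC =====
def Spec_solution (A : List Int) (B : List Int) (out : Int) : Prop := out = solution_alt A B
instance (A : List Int) (B : List Int) (out : Int) : Decidable (Spec_solution A B out) := by unfold Spec_solution; infer_instance

-- ===== CLAIM (what is proved, stated in full; the proofs are below) =====
def Claim_equal_solution : Prop := ∀ (A : List Int) (B : List Int), Dom_solution A B → Spec_solution A B (solution A B)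

-- ===== LEMMAS AND PROOFS =====

-- ===== VERDICT (by name: the statement is the Claim_ definition above) =====
-- A's remove always hits the head of the stack copy: stack = remaining iteration list
theorem pvRemoveA_cons (x : Int × Int) (l : List (Int × Int)) : pvRemoveA x (x :: l) = l := by
  simp [pvRemoveA]

-- with stack = iterated list, A's inner loop is exactly pop-while + the break test
theorem pvInnerA_eq (fish : Int × Int) : ∀ (l : List (Int × Int)),
    pvInnerA fish l l =
      match pvPopB fish l with
      | [] => []
      | t :: rest => if t.2 = 1 ∧ fish.2 = 0 ∧ t.1 > fish.1 then t :: rest else fish :: t :: rest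
  | [] => by simp [pvInnerA, pvPopB]
  | f :: rest => by
    by_cases h : f.2 = 1 ∧ fish.2 = 0 ∧ f.1 < fish.1
    · rw [pvInnerA, if_pos h, pvRemoveA_cons, pvInnerA_eq fish rest, pvPopB, if_pos h]
    · rw [pvInnerA, if_neg h, pvPopB, if_neg h]

theorem pvStep_eq (fs : List (Int × Int)) (fish : Int × Int) : pvStepA fs fish = pvStepB fs fish := by
  rcases fs with _ | ⟨f, rest⟩
  · simp [pvStepA, pvStepB, pvPopB]
  · rw [pvStepA, if_neg (by simp), pvStepB, pvInnerA_eq]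
    rcases hp : pvPopB fish (f :: rest) with _ | ⟨t, r⟩
    · simp
    · by_cases h : t.2 = 1 ∧ fish.2 = 0 ∧ t.1 > fish.1 <;> simp [h]

theorem foldl_step_eq (fishes : List (Int × Int)) (init : List (Int × Int)) :
    fishes.foldl pvStepA init = fishes.foldl pvStepB init := by
  induction fishes generalizing init with
  | nil => rfl
  | cons f rest ih => simp [List.foldl, pvStep_eq, ih]

-- ===== VERDICT (by name: the statement is the Claim_ definition above) =====
theorem solution_spec : Claim_equal_solution := by
  intro A B _
  unfold Spec_solution solution solution_alt
  rw [foldl_step_eq]
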